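-- pv_equiv track=rewrite | github.com/daniel-reich/ubiquitous-fiesta | BmZ6PGMJiLWMzgvos_3.py | is_special_array
-- ===== SOURCE A (Python) =====
-- def is_special_array(lst):
--   false = 0
--   for num in lst[::2]:
--     if num % 2 != 0:
--       false += 1
--   if false != 0:
--     return False
--   else:
--     for num in lst[1::2]:
--       if num % 2 == 0:
--         false += 1
--   if false != 0:
--     return False
--   return True
-- ===== SOURCE B (Python) =====
-- def is_special_array(lst):
--     return all(i % 2 == num % 2 for i, num in enumerate(lst))
-- ===== Notes on version B (the rewrite author's own statement) =====
-- stated objective: simpler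
-- what changed: One enumerate pass comparing index parity to value parity replaces A's two slice-built passes (lst[::2], lst[1::2]) with a running mismatch counter.
import Mathlib
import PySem

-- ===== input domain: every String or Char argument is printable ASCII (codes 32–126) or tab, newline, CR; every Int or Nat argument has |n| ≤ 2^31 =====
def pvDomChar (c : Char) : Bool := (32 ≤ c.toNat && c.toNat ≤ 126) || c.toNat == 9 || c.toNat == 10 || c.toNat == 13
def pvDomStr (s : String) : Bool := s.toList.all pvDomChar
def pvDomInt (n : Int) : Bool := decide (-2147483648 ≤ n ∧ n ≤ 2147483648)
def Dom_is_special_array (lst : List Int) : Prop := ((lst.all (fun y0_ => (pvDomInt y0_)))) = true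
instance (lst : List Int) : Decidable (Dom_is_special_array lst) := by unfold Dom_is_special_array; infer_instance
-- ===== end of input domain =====

-- B: one enumerate pass comparing index parity to value parity, replacing A's two slice passes with a counter (objective: simpler).


-- ===== PORT A =====
-- lst[::2] / lst[1::2]: a step-2 slice with default bounds is exactly "every second
-- element"; ported by hand as everyOther (exact for these two slices: lst[1::2] = everyOther (lst.drop 1)).
def everyOther : List Int → List Int
  | [] => []
  | [x] => [x]
  | x :: _ :: rest => x :: everyOther rest

def is_special_array (lst : List Int) : Bool :=
  -- false = 0; for num in lst[::2]: if num % 2 != 0: false += 1; if false != 0: return False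
  let f1 : Int := (everyOther lst).foldl
    (fun f num => if PySem.Int.mod num 2 ≠ 0 then f + 1 else f) 0
  if f1 ≠ 0 then false
  else
    -- else: for num in lst[1::2]: if num % 2 == 0: false += 1; if false != 0: return False; return True
    let f2 : Int := (everyOther (lst.drop 1)).foldl
      (fun f num => if PySem.Int.mod num 2 = 0 then f + 1 else f) f1
    if f2 ≠ 0 then false else true

-- ===== PORT B =====
def is_special_array_alt (lst : List Int) : Bool :=
  (PySem.List.enumerate lst).all
    (fun p => PySem.Int.mod p.1 2 == PySem.Int.mod p.2 2)

-- ===== PRECONDITION & SPEC =====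
def Spec_is_special_array (lst : List Int) (out : Bool) : Prop := out = is_special_array_alt lst
instance (lst : List Int) (out : Bool) : Decidable (Spec_is_special_array lst out) := by unfold Spec_is_special_array; infer_instance

-- ===== CLAIM (what is proved, stated in full; the proofs are below) =====
def Claim_equal_is_special_array : Prop := ∀ (lst : List Int), Dom_is_special_array lst → Spec_is_special_array lst (is_special_array lst)

-- ===== LEMMAS AND PROOFS =====

-- common recursive specification ("even positions even, odd positions odd") both ports are reduced to
def parityOk : List Int → Bool
  | [] => true
  | [a] => PySem.Int.mod a 2 = 0
  | a :: b :: t => (PySem.Int.mod a 2 = 0 && PySem.Int.mod b 2 = 1) && parityOk t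

theorem everyOther_cons_drop (x : Int) (t : List Int) :
    everyOther (x :: t) = x :: everyOther (t.drop 1) := by cases t <;> rfl

theorem foldl_count_eq_zero (p : Int → Prop) [DecidablePred p] :
    ∀ (l : List Int) (c : Int), 0 ≤ c →
      ((l.foldl (fun f num => if p num then f + 1 else f) c) = 0 ↔
        c = 0 ∧ ∀ x ∈ l, ¬ p x) := by
  intro l
  induction l with
  | nil => intro c _; simp
  | cons a t ih =>
    intro c hc
    simp only [List.foldl_cons]
    by_cases hp : p a
    · rw [if_pos hp, ih (c + 1) (by omega)]
      constructor
      · rintro ⟨h, _⟩; omega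
      · rintro ⟨_, h⟩; exact absurd hp (h a (by simp))
    · rw [if_neg hp, ih c hc]
      constructor
      · rintro ⟨h1, h2⟩
        refine ⟨h1, ?_⟩
        intro x hx
        rcases List.mem_cons.mp hx with h | h
        · exact h ▸ hp
        · exact h2 x h
      · rintro ⟨h1, h2⟩
        exact ⟨h1, fun x hx => h2 x (List.mem_cons_of_mem _ hx)⟩

theorem A_eq_true_iff (lst : List Int) :
    is_special_array lst = true ↔
      (∀ x ∈ everyOther lst, PySem.Int.mod x 2 = 0) ∧
      (∀ x ∈ everyOther (lst.drop 1), ¬ PySem.Int.mod x 2 = 0) := by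
  have key1 := foldl_count_eq_zero (fun num => ¬ PySem.Int.mod num 2 = 0)
      (everyOther lst) 0 le_rfl
  have key2 := foldl_count_eq_zero (fun num => PySem.Int.mod num 2 = 0)
      (everyOther (lst.drop 1)) 0 le_rfl
  simp only [ite_not, not_not, true_and] at key1 key2
  simp only [is_special_array, ne_eq, ite_not]
  by_cases h1 : (everyOther lst).foldl
      (fun f num => if PySem.Int.mod num 2 = 0 then f else f + 1) (0 : Int) = 0
  · have h1' := key1.mp h1
    rw [if_pos h1, h1]
    by_cases h2 : (everyOther (lst.drop 1)).foldl
        (fun f num => if PySem.Int.mod num 2 = 0 then f + 1 else f) (0 : Int) = 0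
    · have h2' := key2.mp h2
      rw [if_pos h2]
      simp only [true_iff]
      exact ⟨h1', h2'⟩
    · rw [if_neg h2]
      simp only [Bool.false_eq_true, false_iff, not_and]
      intro _ hodd
      exact h2 (key2.mpr hodd)
  · rw [if_neg h1]
    simp only [Bool.false_eq_true, false_iff, not_and]
    intro heven _
    exact h1 (key1.mpr heven)

theorem cond_iff_parityOk (lst : List Int) :
    ((∀ x ∈ everyOther lst, PySem.Int.mod x 2 = 0) ∧
      (∀ x ∈ everyOther (lst.drop 1), ¬ PySem.Int.mod x 2 = 0)) ↔ parityOk lst = true := by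
  induction lst using parityOk.induct with
  | case1 => simp [everyOther, parityOk]
  | case2 a => simp [everyOther, parityOk]
  | case3 a b t ih =>
    rw [show everyOther (a :: b :: t) = a :: everyOther t from rfl,
      show ((a :: b :: t).drop 1 : List Int) = b :: t from rfl,
      everyOther_cons_drop b t]
    simp only [parityOk, Bool.and_eq_true, decide_eq_true_eq, List.mem_cons, forall_eq_or_imp]
    rw [← ih]
    constructor
    · rintro ⟨⟨ha, he⟩, hb, ho⟩
      refine ⟨⟨ha, ?_⟩, he, ho⟩
      rcases PySem.Int.mod_two_eq b with h | h
      · exact absurd h hb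
      · exact h
    · rintro ⟨⟨ha, hb⟩, he, ho⟩
      exact ⟨⟨ha, he⟩, by rw [hb]; decide, ho⟩

theorem A_eq_parityOk (lst : List Int) : is_special_array lst = parityOk lst := by
  rw [Bool.eq_iff_iff, A_eq_true_iff]
  exact cond_iff_parityOk lst

theorem B_aux_shift (l : List Int) :
    ∀ (s : Int),
      (PySem.List.enumerate l (s + 2)).all
          (fun p => PySem.Int.mod p.1 2 == PySem.Int.mod p.2 2) =
      (PySem.List.enumerate l s).all
          (fun p => PySem.Int.mod p.1 2 == PySem.Int.mod p.2 2) := by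
  induction l with
  | nil => intro s; simp [PySem.List.enumerate_nil]
  | cons a t ih =>
    intro s
    rw [PySem.List.enumerate_cons, PySem.List.enumerate_cons, List.all_cons, List.all_cons]
    have hm : PySem.Int.mod (s + 2) 2 = PySem.Int.mod s 2 := by
      rw [PySem.Int.mod_eq_emod_of_pos (by omega), PySem.Int.mod_eq_emod_of_pos (by omega)]
      omega
    have hs : s + 2 + 1 = s + 1 + 2 := by omega
    rw [hm, hs, ih (s + 1)]

theorem B_eq_parityOk (lst : List Int) : is_special_array_alt lst = parityOk lst := by
  induction lst using parityOk.induct with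
  | case1 => simp [is_special_array_alt, parityOk, PySem.List.enumerate_nil]
  | case2 a =>
    simp only [is_special_array_alt, parityOk, PySem.List.enumerate_cons,
      PySem.List.enumerate_nil, List.all_cons, List.all_nil, Bool.and_true]
    rw [PySem.Int.mod_eq_emod_of_pos (by omega), PySem.Int.mod_eq_emod_of_pos (by omega)]
    rcases Int.emod_two_eq a with h | h <;> simp [h]
  | case3 a b t ih =>
    simp only [is_special_array_alt] at *
    rw [PySem.List.enumerate_cons, PySem.List.enumerate_cons, List.all_cons, List.all_cons]
    rw [show (0 : Int) + 1 + 1 = 0 + 2 from by omega, B_aux_shift t 0, ih, parityOk]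
    rw [show PySem.Int.mod (0:Int) 2 = 0 from rfl, show PySem.Int.mod (0+1:Int) 2 = 1 from rfl]
    rw [PySem.Int.mod_eq_emod_of_pos (by omega : (0:Int) < 2),
      PySem.Int.mod_eq_emod_of_pos (by omega : (0:Int) < 2)]
    rcases Int.emod_two_eq a with ha | ha <;>
      rcases Int.emod_two_eq b with hb | hb <;>
      simp [ha, hb]

-- ===== VERDICT (by name: the statement is the Claim_ definition above) =====
theorem is_special_array_spec : Claim_equal_is_special_array := by
  intro lst _
  show is_special_array lst = is_special_array_alt lst
  rw [A_eq_parityOk, B_eq_parityOk]
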